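-- pv_equiv track=rewrite | github.com/sdcosta8/143-network-simulator | graphing_functions.py | isolate_links
-- ===== SOURCE A (Python) =====
-- def isolate_links(data):
--     L1_right = None
--     L1_left = None
--     L2_right = None
--     L2_left = None
--     L3_right = None
--     L3_left = None
--     for element in data:
--         if element[2] == 'L1_right':
--             L1_right = element
--         elif element[2] == 'L1_left':
--             L1_left = element
--         elif element[2] == 'L2_right':
--             L2_right = element
--         elif element[2] == 'L2_left':
--             L2_left = element
--         elif element[2] == 'L3_right':
--             L3_right = element
--         elif element[2] == 'L3_left':
--             L3_left = element
--     return [L1_right, L2_right, L3_right, L1_left, L2_left, L3_left]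
-- ===== SOURCE B (Python) =====
-- def isolate_links(data):
--     def last_tagged(tag):
--         for element in reversed(data):
--             if element[2] == tag:
--                 return element
--         return None
--     return [last_tagged(tag) for tag in
--             ('L1_right', 'L2_right', 'L3_right', 'L1_left', 'L2_left', 'L3_left')]
-- ===== Notes on version B (the rewrite author's own statement) =====
-- stated objective: alternative
-- what changed: Instead of one forward pass mutating six scalar accumulators through an if/elif chain, B does a per-label backwards search: for each of the six labels it scans reversed(data) and returns the first (i.e. last-in-order) matching element, with early exit.
import Mathlib
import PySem

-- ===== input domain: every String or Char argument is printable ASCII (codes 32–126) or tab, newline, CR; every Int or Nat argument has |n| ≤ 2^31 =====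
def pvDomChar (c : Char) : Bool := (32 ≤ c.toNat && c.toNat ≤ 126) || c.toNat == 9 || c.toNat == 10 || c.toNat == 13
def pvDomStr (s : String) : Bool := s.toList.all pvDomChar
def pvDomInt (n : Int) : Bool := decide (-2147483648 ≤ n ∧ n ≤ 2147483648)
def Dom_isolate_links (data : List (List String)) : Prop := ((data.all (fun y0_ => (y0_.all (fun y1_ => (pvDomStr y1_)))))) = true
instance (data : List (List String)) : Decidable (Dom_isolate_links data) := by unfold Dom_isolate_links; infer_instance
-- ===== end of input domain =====

-- B replaces A's single forward pass over six scalar accumulators by six staged backwards searches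
-- (first match in reversed(data) per label); equal return value on Pre_.

-- ===== PORT A =====
-- A's loop state: the six variables (L1_right, L1_left, L2_right, L2_left, L3_right, L3_left).
def isolate_links_step (st : Option (List String) × Option (List String) × Option (List String) ×
    Option (List String) × Option (List String) × Option (List String)) (element : List String) :
    Option (List String) × Option (List String) × Option (List String) ×
    Option (List String) × Option (List String) × Option (List String) :=
  let k := (PySem.List.pyGet? element 2).getD ""   -- element[2]; total form, in range under Pre_
  if k == "L1_right" then (some element, st.2.1, st.2.2.1, st.2.2.2.1, st.2.2.2.2.1, st.2.2.2.2.2)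
  else if k == "L1_left" then (st.1, some element, st.2.2.1, st.2.2.2.1, st.2.2.2.2.1, st.2.2.2.2.2)
  else if k == "L2_right" then (st.1, st.2.1, some element, st.2.2.2.1, st.2.2.2.2.1, st.2.2.2.2.2)
  else if k == "L2_left" then (st.1, st.2.1, st.2.2.1, some element, st.2.2.2.2.1, st.2.2.2.2.2)
  else if k == "L3_right" then (st.1, st.2.1, st.2.2.1, st.2.2.2.1, some element, st.2.2.2.2.2)
  else if k == "L3_left" then (st.1, st.2.1, st.2.2.1, st.2.2.2.1, st.2.2.2.2.1, some element)
  else st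

def isolate_links (data : List (List String)) : List (Option (List String)) :=
  let st := data.foldl isolate_links_step (none, none, none, none, none, none)
  [st.1, st.2.2.1, st.2.2.2.2.1, st.2.1, st.2.2.2.1, st.2.2.2.2.2]

-- ===== PORT B =====
-- last_tagged(tag): first element of reversed(data) with element[2] == tag, else None.
def isolate_links_last_tagged (data : List (List String)) (tag : String) : Option (List String) :=
  data.reverse.find? (fun element => (PySem.List.pyGet? element 2).getD "" == tag)
  -- element[2]; total form, in range under Pre_

def isolate_links_alt (data : List (List String)) : List (Option (List String)) :=
  ["L1_right", "L2_right", "L3_right", "L1_left", "L2_left", "L3_left"].map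
    (isolate_links_last_tagged data)

-- ===== PRECONDITION & SPEC =====
-- Pre_ excludes exactly the inputs containing an element of length < 3, on which A's element[2] raises IndexError.
def Pre_isolate_links (data : List (List String)) : Prop := ∀ e ∈ data, 3 ≤ e.length
instance (data : List (List String)) : Decidable (Pre_isolate_links data) := by unfold Pre_isolate_links; infer_instance
def pvWitness_isolate_links : List (List String) := [["a", "b", "L2_right"], ["c", "d", "L2_right"], ["e", "f", "zz"]]

def Spec_isolate_links (data : List (List String)) (out : List (Option (List String))) : Prop := out = isolate_links_alt data
instance (data : List (List String)) (out : List (Option (List String))) : Decidable (Spec_isolate_links data out) := by unfold Spec_isolate_links; infer_instance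

-- ===== CLAIM (what is proved, stated in full; the proofs are below) =====
def Claim_equal_isolate_links : Prop := ∀ (data : List (List String)), Dom_isolate_links data → Pre_isolate_links data → Spec_isolate_links data (isolate_links data)

-- ===== LEMMAS AND PROOFS =====
def isolate_links_pred (tag : String) (element : List String) : Bool :=
  (PySem.List.pyGet? element 2).getD "" == tag

-- One step of A's fold, seen label-by-label: a match overwrites that label's slot.
theorem isolate_links_step_eq (st : Option (List String) × Option (List String) × Option (List String) ×
    Option (List String) × Option (List String) × Option (List String)) (e : List String) :
    isolate_links_step st e =
      ((if isolate_links_pred "L1_right" e then some e else st.1),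
       (if isolate_links_pred "L1_left" e then some e else st.2.1),
       (if isolate_links_pred "L2_right" e then some e else st.2.2.1),
       (if isolate_links_pred "L2_left" e then some e else st.2.2.2.1),
       (if isolate_links_pred "L3_right" e then some e else st.2.2.2.2.1),
       (if isolate_links_pred "L3_left" e then some e else st.2.2.2.2.2)) := by
  simp only [isolate_links_step, isolate_links_pred]
  by_cases c1 : (PySem.List.pyGet? e 2).getD "" = "L1_right"
  · simp [c1]
  · by_cases c2 : (PySem.List.pyGet? e 2).getD "" = "L1_left"
    · simp [c1, c2]
    · by_cases c3 : (PySem.List.pyGet? e 2).getD "" = "L2_right"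
      · simp [c1, c2, c3]
      · by_cases c4 : (PySem.List.pyGet? e 2).getD "" = "L2_left"
        · simp [c1, c2, c3, c4]
        · by_cases c5 : (PySem.List.pyGet? e 2).getD "" = "L3_right"
          · simp [c1, c2, c3, c4, c5]
          · by_cases c6 : (PySem.List.pyGet? e 2).getD "" = "L3_left"
            · simp [c1, c2, c3, c4, c5, c6]
            · simp [c1, c2, c3, c4, c5, c6]

-- Appending one element to a backwards search: the new element wins if it matches.
theorem isolate_links_find_snoc (p : List String → Bool) (l : List (List String))
    (e : List String) (o : Option (List String)) :
    (List.find? p (l ++ [e])).or o = (l.find? p).or (if p e then some e else o) := by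
  rw [List.find?_append]
  cases h : l.find? p <;> cases hp : p e <;> simp [List.find?, hp]

-- A's fold computes, per label, the last match in data (falling back to the initial slot).
theorem isolate_links_foldl_eq (data : List (List String)) :
    ∀ st, data.foldl isolate_links_step st =
      ((data.reverse.find? (isolate_links_pred "L1_right")).or st.1,
       (data.reverse.find? (isolate_links_pred "L1_left")).or st.2.1,
       (data.reverse.find? (isolate_links_pred "L2_right")).or st.2.2.1,
       (data.reverse.find? (isolate_links_pred "L2_left")).or st.2.2.2.1,
       (data.reverse.find? (isolate_links_pred "L3_right")).or st.2.2.2.2.1,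
       (data.reverse.find? (isolate_links_pred "L3_left")).or st.2.2.2.2.2) := by
  induction data with
  | nil => intro st; simp
  | cons e rest ih =>
    intro st
    rw [List.foldl_cons, ih, isolate_links_step_eq]
    simp only [List.reverse_cons, isolate_links_find_snoc]

-- ===== VERDICT (by name: the statement is the Claim_ definition above) =====
theorem isolate_links_spec : Claim_equal_isolate_links := by
  intro data _ _
  unfold Spec_isolate_links isolate_links isolate_links_alt isolate_links_last_tagged
  simp only [isolate_links_foldl_eq, Option.or_none]
  rfl
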